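-- pv_equiv track=rewrite | github.com/madhuri-majety/IK | Leetcode/min_dist_of_max_element.py | min_dist_of_max_elemets
-- ===== SOURCE A (Python) =====
-- def min_dist_of_max_elemets(arr, n):
--     max_elem = arr[0]
--     min_dist = n
--     index = 0
--
--     for i in range(1, n):
--         if arr[i] == max_elem:
--             min_dist = min(min_dist, (i-index))
--             index = i
--         elif(arr[i] > max_elem):
--                 max_elem = arr[i]
--                 min_dist = n
--                 index = i
--         else:
--             continue
--
--     return min_dist
-- ===== SOURCE B (Python) =====
-- def min_dist_of_max_elemets(arr, n):
--     # Two-pass re-implementation: find the maximum first, then scan the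
--     # gaps between its occurrences (A fuses both into one running-max scan).
--     max_elem = arr[0]
--     for i in range(1, n):
--         if arr[i] > max_elem:
--             max_elem = arr[i]
--     min_dist = n
--     prev = None
--     for i in range(n):
--         if arr[i] == max_elem:
--             if prev is not None:
--                 min_dist = min(min_dist, i - prev)
--             prev = i
--     return min_dist
-- ===== Notes on version B (the rewrite author's own statement) =====
-- stated objective: alternative
-- what changed: A's single fused scan with a running max (and min_dist resets on every new max) is split into two passes: one pass that finds the maximum of arr[:n], and a second differently-shaped pass over all of range(n) that tracks the previous occurrence of that maximum as an Optional and minimises consecutive gaps.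
import Mathlib
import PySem

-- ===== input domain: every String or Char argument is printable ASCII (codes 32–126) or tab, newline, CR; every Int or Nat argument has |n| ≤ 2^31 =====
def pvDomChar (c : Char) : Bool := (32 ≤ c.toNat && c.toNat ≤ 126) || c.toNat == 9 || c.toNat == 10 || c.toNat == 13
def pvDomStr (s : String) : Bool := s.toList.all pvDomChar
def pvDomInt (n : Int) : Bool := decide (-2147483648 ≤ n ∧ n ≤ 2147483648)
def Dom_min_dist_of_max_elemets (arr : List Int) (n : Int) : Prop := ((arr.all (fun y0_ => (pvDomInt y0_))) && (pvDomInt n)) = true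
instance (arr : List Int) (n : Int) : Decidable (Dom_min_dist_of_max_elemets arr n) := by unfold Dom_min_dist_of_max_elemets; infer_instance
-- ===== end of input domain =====

-- B replaces A's fused running-max scan by a find-max pass plus a separate
-- occurrence-gap pass (alternative decomposition, same O(n) cost).

-- ===== PORT A =====
-- one loop iteration of A: state (max_elem, min_dist, index)
def stepA (arr : List Int) (n : Int) (st : Int × Int × Int) (i : Int) : Int × Int × Int :=
  if PySem.List.pyGetD arr i 0 = st.1 then
    (st.1, min st.2.1 (i - st.2.2), i)
  else if PySem.List.pyGetD arr i 0 > st.1 then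
    (PySem.List.pyGetD arr i 0, n, i)
  else
    st

def min_dist_of_max_elemets (arr : List Int) (n : Int) : Int :=
  ((PySem.List.pyRange 1 n 1).foldl (stepA arr n)
    (PySem.List.pyGetD arr 0 0, n, 0)).2.1

-- ===== PORT B =====
-- first pass of B: running maximum
def maxStep (arr : List Int) (mx : Int) (i : Int) : Int :=
  if PySem.List.pyGetD arr i 0 > mx then PySem.List.pyGetD arr i 0 else mx

-- second pass of B: state (min_dist, prev); prev = None ↦ none
def gapStep (arr : List Int) (m : Int) (st : Int × Option Int) (i : Int) : Int × Option Int :=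
  if PySem.List.pyGetD arr i 0 = m then
    match st.2 with
    | some p => (min st.1 (i - p), some i)
    | none => (st.1, some i)
  else st

def min_dist_of_max_elemets_alt (arr : List Int) (n : Int) : Int :=
  let m := (PySem.List.pyRange 1 n 1).foldl (maxStep arr) (PySem.List.pyGetD arr 0 0)
  ((PySem.List.pyRange 0 n 1).foldl (gapStep arr m) (n, none)).1

-- ===== PRECONDITION & SPEC =====
-- Pre_ excludes exactly the inputs where the Python A raises IndexError:
-- empty arr (arr[0]) or n > len(arr) (arr[i] for some i in range(1, n)).
def Pre_min_dist_of_max_elemets (arr : List Int) (n : Int) : Prop :=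
  arr ≠ [] ∧ n ≤ (arr.length : Int)
instance (arr : List Int) (n : Int) : Decidable (Pre_min_dist_of_max_elemets arr n) := by
  unfold Pre_min_dist_of_max_elemets; infer_instance

def pvWitness_min_dist_of_max_elemets : List Int × Int := ([3, 1, 3], 3)

def Spec_min_dist_of_max_elemets (arr : List Int) (n : Int) (out : Int) : Prop :=
  out = min_dist_of_max_elemets_alt arr n
instance (arr : List Int) (n : Int) (out : Int) : Decidable (Spec_min_dist_of_max_elemets arr n out) := by
  unfold Spec_min_dist_of_max_elemets; infer_instance

-- ===== CLAIM (what is proved, stated in full; the proofs are below) =====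
def Claim_equal_min_dist_of_max_elemets : Prop :=
  ∀ (arr : List Int) (n : Int), Dom_min_dist_of_max_elemets arr n →
    Pre_min_dist_of_max_elemets arr n →
    Spec_min_dist_of_max_elemets arr n (min_dist_of_max_elemets arr n)

-- ===== LEMMAS AND PROOFS =====

-- shorthand for arr[i] (in range inside both ports' accesses under Pre_)
def g (arr : List Int) (i : Int) : Int := PySem.List.pyGetD arr i 0

-- the unconditional body of B's second-pass step
def pstep (st : Int × Option Int) (i : Int) : Int × Option Int :=
  match st.2 with
  | some p => (min st.1 (i - p), some i)
  | none => (st.1, some i)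

-- running maximum of arr[0..j) (B's first fold, as a function of the bound)
def rmax (arr : List Int) (j : Int) : Int :=
  (PySem.List.pyRange 1 j 1).foldl (maxStep arr) (PySem.List.pyGetD arr 0 0)

-- indices i ∈ [0, j) with arr[i] = m
def occ (arr : List Int) (m : Int) (j : Int) : List Int :=
  (PySem.List.pyRange 0 j 1).filter (fun i => PySem.List.pyGetD arr i 0 == m)

lemma pstep_eq (st : Int × Option Int) (i p : Int) (h : st.2 = some p) :
    pstep st i = (min st.1 (i - p), some i) := by
  unfold pstep
  rw [h]

lemma foldl_gapStep_filter (arr : List Int) (m : Int) :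
    ∀ (l : List Int) (init : Int × Option Int),
      l.foldl (gapStep arr m) init
        = (l.filter (fun i => PySem.List.pyGetD arr i 0 == m)).foldl pstep init := by
  intro l
  induction l with
  | nil => intro init; rfl
  | cons a t ih =>
    intro init
    by_cases h : PySem.List.pyGetD arr a 0 = m
    · have hb : (PySem.List.pyGetD arr a 0 == m) = true := by simpa using h
      have hg : gapStep arr m init a = pstep init a := by
        unfold gapStep pstep
        rw [if_pos h]
      rw [List.foldl_cons, List.filter_cons, hb, hg, ih]
      simp
    · have hb : (PySem.List.pyGetD arr a 0 == m) = false := by simpa using h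
      have hg : gapStep arr m init a = init := by
        unfold gapStep
        rw [if_neg h]
      rw [List.foldl_cons, List.filter_cons, hb, hg, ih]
      simp

lemma rmax_le_succ (arr : List Int) (j : Nat) (hj : 1 ≤ j) :
    rmax arr j ≤ rmax arr ((j : Int) + 1) := by
  have hsplit : PySem.List.pyRange 1 ((j : Int) + 1) 1
      = PySem.List.pyRange 1 (j : Int) 1 ++ [(j : Int)] :=
    PySem.List.pyRange_one_succ_right (by exact_mod_cast hj)
  unfold rmax
  rw [hsplit, List.foldl_append]
  simp only [List.foldl_cons, List.foldl_nil, maxStep]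
  split_ifs with h
  · omega
  · omega

lemma rmax_ge (arr : List Int) :
    ∀ (j : Nat), 1 ≤ j → ∀ i : Int, 0 ≤ i → i < (j : Int) → g arr i ≤ rmax arr j := by
  intro j
  induction j with
  | zero => intro h; omega
  | succ k ih =>
    intro _ i hi0 hij
    by_cases hk : 1 ≤ k
    · have hle : rmax arr k ≤ rmax arr ((k : Int) + 1) := rmax_le_succ arr k hk
      have hcast : ((k + 1 : Nat) : Int) = (k : Int) + 1 := by push_cast; ring
      rw [hcast]
      by_cases hik : i < (k : Int)
      · have := ih hk i hi0 hik
        omega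
      · have hieq : i = (k : Int) := by push_cast at hij; omega
        have hsplit : PySem.List.pyRange 1 ((k : Int) + 1) 1
            = PySem.List.pyRange 1 (k : Int) 1 ++ [(k : Int)] :=
          PySem.List.pyRange_one_succ_right (by exact_mod_cast hk)
        subst hieq
        unfold rmax g
        rw [hsplit, List.foldl_append]
        simp only [List.foldl_cons, List.foldl_nil, maxStep]
        split_ifs with h
        · omega
        · omega
    · have hk0 : k = 0 := by omega
      subst hk0
      have hieq : i = 0 := by push_cast at hij; omega
      subst hieq
      unfold rmax g
      have h1 : ((0 + 1 : Nat) : Int) = 1 := by norm_num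
      rw [h1, PySem.List.pyRange_one_eq_nil (by omega)]
      simp

lemma A_inv (arr : List Int) (n : Int) :
    ∀ (j : Nat), 1 ≤ j →
      ∃ idx : Int,
        ((PySem.List.pyRange 1 (j : Int) 1).foldl (stepA arr n)
            (PySem.List.pyGetD arr 0 0, n, 0))
          = (rmax arr j, ((occ arr (rmax arr j) j).foldl pstep (n, none)).1, idx)
        ∧ ((occ arr (rmax arr j) j).foldl pstep (n, none)).2 = some idx := by
  intro j
  induction j with
  | zero => intro h; omega
  | succ k ih =>
    intro _
    by_cases hk : 1 ≤ k
    · obtain ⟨idx, heq, hsnd⟩ := ih hk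
      have hcast : ((k + 1 : Nat) : Int) = (k : Int) + 1 := by push_cast; ring
      have hsplitA : PySem.List.pyRange 1 ((k : Int) + 1) 1
          = PySem.List.pyRange 1 (k : Int) 1 ++ [(k : Int)] :=
        PySem.List.pyRange_one_succ_right (by exact_mod_cast hk)
      have hsplit0 : PySem.List.pyRange 0 ((k : Int) + 1) 1
          = PySem.List.pyRange 0 (k : Int) 1 ++ [(k : Int)] :=
        PySem.List.pyRange_one_succ_right (by positivity)
      have hrmax : rmax arr ((k : Int) + 1)
          = maxStep arr (rmax arr (k : Int)) (k : Int) := by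
        unfold rmax
        rw [hsplitA, List.foldl_append]
        rfl
      rcases lt_trichotomy (g arr (k : Int)) (rmax arr (k : Int)) with hlt | heqm | hgt
      · -- arr[k] < running max: state unchanged
        have hrm : rmax arr ((k : Int) + 1) = rmax arr (k : Int) := by
          rw [hrmax]; unfold maxStep
          rw [if_neg (by unfold g at hlt; omega)]
        have hb : (PySem.List.pyGetD arr (k : Int) 0 == rmax arr (k : Int)) = false := by
          unfold g at hlt; simpa using (by omega : ¬ PySem.List.pyGetD arr (k : Int) 0 = rmax arr (k : Int))
        have hocc : occ arr (rmax arr ((k : Int) + 1)) ((k : Int) + 1)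
            = occ arr (rmax arr (k : Int)) (k : Int) := by
          rw [hrm]; unfold occ
          rw [hsplit0, List.filter_append, List.filter_cons, hb]
          simp
        refine ⟨idx, ?_, ?_⟩
        · rw [hcast, hsplitA, List.foldl_append, heq, hocc, hrm]
          simp only [List.foldl_cons, List.foldl_nil]
          unfold stepA
          rw [if_neg (by unfold g at hlt; omega), if_neg (by unfold g at hlt; omega)]
        · rw [hcast, hocc]; exact hsnd
      · -- arr[k] = running max: gap update, index moves to k
        have hrm : rmax arr ((k : Int) + 1) = rmax arr (k : Int) := by
          rw [hrmax]; unfold maxStep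
          rw [if_neg (by unfold g at heqm; omega)]
        have hb : (PySem.List.pyGetD arr (k : Int) 0 == rmax arr (k : Int)) = true := by
          unfold g at heqm; simpa using heqm
        have hocc : occ arr (rmax arr ((k : Int) + 1)) ((k : Int) + 1)
            = occ arr (rmax arr (k : Int)) (k : Int) ++ [(k : Int)] := by
          rw [hrm]; unfold occ
          rw [hsplit0, List.filter_append, List.filter_cons, hb]
          simp
        have hps : ((occ arr (rmax arr (k : Int)) (k : Int)) ++ [(k : Int)]).foldl pstep (n, none)
            = (min ((occ arr (rmax arr (k : Int)) (k : Int)).foldl pstep (n, none)).1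
                ((k : Int) - idx), some (k : Int)) := by
          rw [List.foldl_append]
          simp only [List.foldl_cons, List.foldl_nil]
          rw [pstep_eq _ _ idx hsnd]
        refine ⟨(k : Int), ?_, ?_⟩
        · rw [hcast, hsplitA, List.foldl_append, heq, hocc, hrm, hps]
          simp only [List.foldl_cons, List.foldl_nil]
          unfold stepA
          rw [if_pos (by unfold g at heqm; exact heqm)]
        · rw [hcast, hocc, hps]
      · -- arr[k] > running max: reset, index moves to k
        have hrm : rmax arr ((k : Int) + 1) = g arr (k : Int) := by
          rw [hrmax]; unfold maxStep g
          rw [if_pos (by unfold g at hgt; omega)]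
        have hocc : occ arr (rmax arr ((k : Int) + 1)) ((k : Int) + 1) = [(k : Int)] := by
          rw [hrm]; unfold occ
          have hnil : (PySem.List.pyRange 0 (k : Int) 1).filter
              (fun i => PySem.List.pyGetD arr i 0 == g arr (k : Int)) = [] := by
            rw [List.filter_eq_nil_iff]
            intro i hi
            have hmem := (PySem.List.mem_pyRange_one).mp hi
            have hle : g arr i ≤ rmax arr k := rmax_ge arr k hk i hmem.1 hmem.2
            unfold g at hle hgt ⊢
            simpa using (by omega : ¬ PySem.List.pyGetD arr i 0 = PySem.List.pyGetD arr (k : Int) 0)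
          have hb : (PySem.List.pyGetD arr (k : Int) 0 == g arr (k : Int)) = true := by
            unfold g; simp
          rw [hsplit0, List.filter_append, hnil, List.filter_cons, hb]
          simp
        refine ⟨(k : Int), ?_, ?_⟩
        · rw [hcast, hsplitA, List.foldl_append, heq, hocc, hrm]
          simp only [List.foldl_cons, List.foldl_nil]
          unfold stepA pstep g
          rw [if_neg (by unfold g at hgt; omega), if_pos (by unfold g at hgt; omega)]
        · rw [hcast, hocc]
          rfl
    · -- k = 0: base case j = 1
      have hk0 : k = 0 := by omega
      subst hk0
      have h1 : ((0 + 1 : Nat) : Int) = 1 := by norm_num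
      have hA : PySem.List.pyRange 1 1 1 = [] := PySem.List.pyRange_one_eq_nil (by omega)
      have h0 : PySem.List.pyRange 0 1 1 = [0] := by
        simpa using PySem.List.pyRange_one_singleton 0
      have hocc : occ arr (rmax arr (1 : Int)) (1 : Int) = [0] := by
        unfold occ rmax
        rw [hA, h0, List.filter_cons]
        have hb : (PySem.List.pyGetD arr 0 0 == (List.foldl (maxStep arr) (PySem.List.pyGetD arr 0 0) [])) = true := by
          simp
        rw [hb]
        simp
      refine ⟨0, ?_, ?_⟩
      · rw [h1, hocc]
        unfold rmax
        rw [hA]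
        rfl
      · rw [h1, hocc]
        rfl

-- ===== VERDICT (by name: the statement is the Claim_ definition above) =====
theorem min_dist_of_max_elemets_spec : Claim_equal_min_dist_of_max_elemets := by
  intro arr n _hdom _hpre
  unfold Spec_min_dist_of_max_elemets min_dist_of_max_elemets min_dist_of_max_elemets_alt
  by_cases hn : 1 ≤ n
  · have hjle : 1 ≤ n.toNat := by omega
    obtain ⟨idx, heq, _⟩ := A_inv arr n n.toNat hjle
    have hcast : ((n.toNat : Nat) : Int) = n := by omega
    rw [hcast] at heq
    show ((PySem.List.pyRange 1 n 1).foldl (stepA arr n) (PySem.List.pyGetD arr 0 0, n, 0)).2.1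
        = ((PySem.List.pyRange 0 n 1).foldl (gapStep arr (rmax arr n)) (n, none)).1
    rw [heq, foldl_gapStep_filter]
    rfl
  · have hA : PySem.List.pyRange 1 n 1 = [] := PySem.List.pyRange_one_eq_nil (by omega)
    have hB : PySem.List.pyRange 0 n 1 = [] := PySem.List.pyRange_one_eq_nil (by omega)
    show ((PySem.List.pyRange 1 n 1).foldl (stepA arr n) (PySem.List.pyGetD arr 0 0, n, 0)).2.1
        = ((PySem.List.pyRange 0 n 1).foldl (gapStep arr (rmax arr n)) (n, none)).1
    rw [hA, hB]
    rfl
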